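-- pv_equiv track=rewrite | github.com/rinikerlab/HybridTopologyViewer | HybridTopologyViewer.py | ter_block_label
-- ===== SOURCE A (Python) =====
-- AA_LIST = ["ALA", "ARG", "ASN", "ASP", "CYS", "GLU", "GLN", "GLY", "HIS", "ILE", "LEU", "LYS", "MET", "PHE", "PRO", "SER", "THR", "TRP", "TYR", "VAL"]
--
-- AA_UNNAT_LIST = ['CYSH', 'HIE', 'HISB']
--
-- def ter_block_label(molecule_keys: list, molecule_name: str,
--                     combine_aa_to_protein: bool, peptide_atom_number: list,
--                     atom_number: int) -> str:
--
--     '''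
--     Usage
--     -----------
--     Looks at the input line and creates a new name if a protein, peptide, solvent, ... is encountered.
--     If none of these are present, an empty string is returned.
--
--     Parameters:
--     -----------
--     molecule_keys: list
--         The molecule names currently saved in the atom dictionary.
--
--     molecule_name: str
--         label according to pdb file
--
--     combine_aa_to_protein: bool
--         if True, the encountered aminoacids will be put toghether as one protein
--
--     peptide_atom_number: list
--         Used, if some molecules are peptides. In this case, the first atom of the respective peptide is given.
--
--     atom_number: int
--         Current atom index
--
--     Returns
--     -----------
--     returns label for molecule
--     '''
--
--     combined_label = ''
--     # Check if aminoacid encountered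
--     if molecule_name.upper() in AA_LIST or molecule_name.upper() in AA_UNNAT_LIST:
--
--         # Check if peptide
--         if len(peptide_atom_number) > 0 and atom_number in peptide_atom_number:
--             combined_label = 'peptide_'
--
--         # Check if protein
--         elif combine_aa_to_protein:
--             combined_label = 'protein_'
--
--     # Check if solvent
--     elif molecule_name == 'solv':
--         combined_label = 'solv_'
--
--     # Check if name is empty
--     if combined_label != '':
--         x = 1
--         # Check if name is in dictionary, else increase numbering
--         while combined_label + str(x) in molecule_keys:
--             x += 1
--
--         combined_label = combined_label + str(x)
--
--     # New block, but same label as already given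
--     elif molecule_name in molecule_keys:
--         x = 2
--         while molecule_name + '_' + str(x) in molecule_keys:
--             x += 1
--         combined_label = molecule_name + '_' + str(x)
--
--     return combined_label
-- ===== SOURCE B (Python) =====
-- AA_LIST = ["ALA", "ARG", "ASN", "ASP", "CYS", "GLU", "GLN", "GLY", "HIS", "ILE", "LEU", "LYS", "MET", "PHE", "PRO", "SER", "THR", "TRP", "TYR", "VAL"]
--
-- AA_UNNAT_LIST = ['CYSH', 'HIE', 'HISB']
--
--
-- def _canon_num(s):
--     """Value of s if s is the canonical decimal of a non-negative int
--     (non-empty, digits only, no leading zero), else None."""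
--     if s == '' or (len(s) > 1 and s[0] == '0'):
--         return None
--     v = 0
--     for ch in s:
--         if ch < '0' or ch > '9':
--             return None
--         v = v * 10 + (ord(ch) - 48)
--     return v
--
--
-- def _next_free(molecule_keys, prefix, start):
--     """First number >= start such that prefix+str(n) is not a key: collect the
--     numeric suffixes of keys under this prefix, sort them, and scan for the
--     first gap -- no candidate label is ever probed against the key list."""
--     plen = len(prefix)
--     nums = sorted({v for v in (_canon_num(k[plen:]) for k in molecule_keys
--                                if k.startswith(prefix)) if v is not None})
--     x = start
--     for n in nums:
--         if n < x:
--             continue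
--         elif n == x:
--             x += 1
--         else:
--             break
--     return prefix + str(x)
--
--
-- def ter_block_label(molecule_keys: list, molecule_name: str,
--                     combine_aa_to_protein: bool, peptide_atom_number: list,
--                     atom_number: int) -> str:
--     up = molecule_name.upper()
--     if up in AA_LIST or up in AA_UNNAT_LIST:
--         if len(peptide_atom_number) > 0 and atom_number in peptide_atom_number:
--             return _next_free(molecule_keys, 'peptide_', 1)
--         if combine_aa_to_protein:
--             return _next_free(molecule_keys, 'protein_', 1)
--         if molecule_name in molecule_keys:
--             return _next_free(molecule_keys, molecule_name + '_', 2)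
--         return ''
--     if molecule_name == 'solv':
--         return _next_free(molecule_keys, 'solv_', 1)
--     if molecule_name in molecule_keys:
--         return _next_free(molecule_keys, molecule_name + '_', 2)
--     return ''
-- ===== Notes on version B (the rewrite author's own statement) =====
-- stated objective: alternative
-- what changed: A probes candidate labels against the key list one number at a time; B never probes: it parses the canonical numeric suffix of every key under the prefix in one pass, sorts the resulting integer set, and finds the first free number by a linear gap scan over that sorted list.
import Mathlib
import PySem

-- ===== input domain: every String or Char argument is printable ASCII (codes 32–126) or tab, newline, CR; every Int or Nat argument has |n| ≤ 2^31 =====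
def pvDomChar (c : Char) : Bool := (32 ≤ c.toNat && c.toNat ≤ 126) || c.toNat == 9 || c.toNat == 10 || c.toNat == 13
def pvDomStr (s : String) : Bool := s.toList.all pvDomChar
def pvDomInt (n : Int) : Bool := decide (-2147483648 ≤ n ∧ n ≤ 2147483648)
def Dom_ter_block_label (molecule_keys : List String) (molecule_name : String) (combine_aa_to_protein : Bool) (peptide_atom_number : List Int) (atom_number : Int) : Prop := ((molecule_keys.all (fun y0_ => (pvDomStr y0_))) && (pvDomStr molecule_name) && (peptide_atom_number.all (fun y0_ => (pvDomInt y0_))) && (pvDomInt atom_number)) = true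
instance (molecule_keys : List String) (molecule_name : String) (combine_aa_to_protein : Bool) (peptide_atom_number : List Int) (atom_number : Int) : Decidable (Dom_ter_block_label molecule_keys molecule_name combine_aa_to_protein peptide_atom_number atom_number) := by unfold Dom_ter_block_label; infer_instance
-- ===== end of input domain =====

-- B replaces A's probe loop (test candidate labels against the key list, incrementing)
-- by a different algorithm: one pass parses the canonical numeric suffix of every key
-- under the prefix, the resulting integer set is sorted, and the first free number is
-- found by a linear gap scan over that sorted list (objective: alternative).

-- ===== PORT A =====
def pvAA_LIST : List String := ["ALA", "ARG", "ASN", "ASP", "CYS", "GLU", "GLN", "GLY", "HIS", "ILE", "LEU", "LYS", "MET", "PHE", "PRO", "SER", "THR", "TRP", "TYR", "VAL"]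

def pvAA_UNNAT_LIST : List String := ["CYSH", "HIE", "HISB"]

-- A's 'while combined_label + str(x) in molecule_keys: x += 1' (fuel keys.length+1 provably suffices)
def terLoopA (keys : List String) (lbl : String) (x : Int) : Nat → String
  | 0 => lbl ++ PySem.Int.toStr x
  | f + 1 =>
    if keys.contains (lbl ++ PySem.Int.toStr x) then terLoopA keys lbl (x + 1) f
    else lbl ++ PySem.Int.toStr x

def ter_block_label (molecule_keys : List String) (molecule_name : String) (combine_aa_to_protein : Bool) (peptide_atom_number : List Int) (atom_number : Int) : String :=
  let combined_label : String :=
    if pvAA_LIST.contains (PySem.Str.upper molecule_name) || pvAA_UNNAT_LIST.contains (PySem.Str.upper molecule_name) then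
      if decide (0 < peptide_atom_number.length) && peptide_atom_number.contains atom_number then "peptide_"
      else if combine_aa_to_protein then "protein_"
      else ""
    else if molecule_name == "solv" then "solv_"
    else ""
  if combined_label != "" then
    terLoopA molecule_keys combined_label 1 (molecule_keys.length + 1)
  else if molecule_keys.contains molecule_name then
    terLoopA molecule_keys (molecule_name ++ "_") 2 (molecule_keys.length + 1)
  else combined_label

-- ===== PORT B =====
-- B's '_canon_num' inner loop: v = v * 10 + (ord(ch) - 48), None on a non-digit
def pvCanonLoop : List Char → Nat → Option Nat
  | [], v => some v
  | c :: cs, v => if c < '0' ∨ '9' < c then none else pvCanonLoop cs (v * 10 + (c.toNat - 48))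

-- B's '_canon_num' (on the char list of the suffix; guards exactly s=='' and len>1 & s[0]=='0')
def pvCanonNum (cs : List Char) : Option Int :=
  match cs with
  | [] => none
  | c :: rest =>
    if decide (rest ≠ []) && (c == '0') then none
    else (pvCanonLoop (c :: rest) 0).map Int.ofNat

-- B's 'sorted({v for ...})': parse the suffix of each key under the prefix, set, sort
def pvNums (molecule_keys : List String) (pfx : String) : List Int :=
  PySem.List.sorted
    (PySem.Set.ofList (molecule_keys.filterMap (fun k =>
      if PySem.Str.startswith k pfx then
        pvCanonNum (PySem.Str.slice k (some (PySem.Str.len pfx)) none).toList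
      else none)))
    (fun x => x)

-- B's 'for n in nums: …' gap scan with break
def pvScan : List Int → Int → Int
  | [], x => x
  | n :: rest, x => if n < x then pvScan rest x else if n = x then pvScan rest (x + 1) else x

def nextFree (molecule_keys : List String) (pfx : String) (start : Int) : String :=
  pfx ++ PySem.Int.toStr (pvScan (pvNums molecule_keys pfx) start)

def ter_block_label_alt (molecule_keys : List String) (molecule_name : String) (combine_aa_to_protein : Bool) (peptide_atom_number : List Int) (atom_number : Int) : String :=
  let up := PySem.Str.upper molecule_name
  if pvAA_LIST.contains up || pvAA_UNNAT_LIST.contains up then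
    if decide (0 < peptide_atom_number.length) && peptide_atom_number.contains atom_number then
      nextFree molecule_keys "peptide_" 1
    else if combine_aa_to_protein then
      nextFree molecule_keys "protein_" 1
    else if molecule_keys.contains molecule_name then
      nextFree molecule_keys (molecule_name ++ "_") 2
    else ""
  else if molecule_name == "solv" then
    nextFree molecule_keys "solv_" 1
  else if molecule_keys.contains molecule_name then
    nextFree molecule_keys (molecule_name ++ "_") 2
  else ""

-- ===== PRECONDITION & SPEC =====
def Spec_ter_block_label (molecule_keys : List String) (molecule_name : String) (combine_aa_to_protein : Bool) (peptide_atom_number : List Int) (atom_number : Int) (out : String) : Prop := out = ter_block_label_alt molecule_keys molecule_name combine_aa_to_protein peptide_atom_number atom_number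
instance (molecule_keys : List String) (molecule_name : String) (combine_aa_to_protein : Bool) (peptide_atom_number : List Int) (atom_number : Int) (out : String) : Decidable (Spec_ter_block_label molecule_keys molecule_name combine_aa_to_protein peptide_atom_number atom_number out) := by unfold Spec_ter_block_label; infer_instance

-- ===== CLAIM (what is proved, stated in full; the proofs are below) =====
def Claim_equal_ter_block_label : Prop := ∀ (molecule_keys : List String) (molecule_name : String) (combine_aa_to_protein : Bool) (peptide_atom_number : List Int) (atom_number : Int), Dom_ter_block_label molecule_keys molecule_name combine_aa_to_protein peptide_atom_number atom_number → Spec_ter_block_label molecule_keys molecule_name combine_aa_to_protein peptide_atom_number atom_number (ter_block_label molecule_keys molecule_name combine_aa_to_protein peptide_atom_number atom_number)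

-- ===== LEMMAS AND PROOFS =====

-- str(n) for n ≥ 0, as a structural recursion
def pvRep (n : Nat) : List Char :=
  if h : n < 10 then [Nat.digitChar n]
  else pvRep (n / 10) ++ [Nat.digitChar (n % 10)]
decreasing_by exact Nat.div_lt_self (by omega) (by omega)

lemma pvRep_toDigitsCore : ∀ (f n : Nat) (l : List Char), n < f →
    Nat.toDigitsCore 10 f n l = pvRep n ++ l := by
  intro f
  induction f with
  | zero => intro n l h; omega
  | succ f ih =>
    intro n l h
    rw [Nat.toDigitsCore]
    by_cases h10 : n < 10
    · have : n / 10 = 0 := Nat.div_eq_of_lt h10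
      rw [pvRep, dif_pos h10]
      simp [this, Nat.mod_eq_of_lt h10]
    · have hne : ¬ n / 10 = 0 := by omega
      rw [if_neg hne, ih (n / 10) _ (by omega)]
      conv_rhs => rw [pvRep]
      rw [dif_neg h10]
      simp

lemma pvRep_toDigits (n : Nat) : Nat.toDigits 10 n = pvRep n := by
  rw [Nat.toDigits, pvRep_toDigitsCore (n + 1) n [] (by omega), List.append_nil]

lemma pvDigitChar_val (d : Nat) (h : d < 10) : (Nat.digitChar d).toNat - 48 = d := by
  interval_cases d <;> rfl

lemma pvDigitChar_range (d : Nat) (h : d < 10) :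
    48 ≤ (Nat.digitChar d).toNat ∧ (Nat.digitChar d).toNat ≤ 57 := by
  interval_cases d <;> exact ⟨by decide, by decide⟩

lemma pvRep_val : ∀ (n : Nat) (a : Nat),
    List.foldl (fun acc c => acc * 10 + (c.toNat - 48)) a (pvRep n)
      = a * 10 ^ (pvRep n).length + n := by
  intro n
  induction n using Nat.strong_induction_on with
  | _ n ih =>
    intro a
    by_cases h : n < 10
    · rw [pvRep, dif_pos h]
      simp [List.foldl, pvDigitChar_val n h]
    · rw [pvRep, dif_neg h]
      rw [List.foldl_append, ih (n / 10) (Nat.div_lt_self (by omega) (by omega)) a]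
      simp only [List.foldl, List.length_append, List.length_singleton]
      rw [pvDigitChar_val (n % 10) (Nat.mod_lt _ (by omega))]
      have hn : n / 10 * 10 + n % 10 = n := Nat.div_add_mod n 10 ▸ by omega
      ring_nf
      omega

lemma pvRep_inj {m n : Nat} (h : pvRep m = pvRep n) : m = n := by
  have hm := pvRep_val m 0
  have hn := pvRep_val n 0
  rw [h] at hm
  simp only [Nat.zero_mul, Nat.zero_add] at hm hn
  omega

lemma pvToStr_inj {a b : Int} (ha : 0 ≤ a) (hb : 0 ≤ b)
    (h : PySem.Int.toStr a = PySem.Int.toStr b) : a = b := by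
  have h' : PySem.Int.toChars a = PySem.Int.toChars b := by
    rw [← PySem.Int.toList_toStr, ← PySem.Int.toList_toStr, h]
  rw [PySem.Int.toChars, PySem.Int.toChars, if_neg (by omega), if_neg (by omega),
      pvRep_toDigits, pvRep_toDigits] at h'
  have := pvRep_inj h'
  omega

lemma pvToStr_nonneg (y : Int) (h : 0 ≤ y) :
    (PySem.Int.toStr y).toList = pvRep y.toNat := by
  rw [PySem.Int.toList_toStr, PySem.Int.toChars, if_neg (by omega), pvRep_toDigits]

lemma pvAppend_cancel {p s t : String} (h : p ++ s = p ++ t) : s = t := by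
  apply String.toList_inj.mp
  have := congrArg String.toList h
  rw [String.toList_append, String.toList_append] at this
  exact List.append_cancel_left this

lemma pvSlice_append (pfx t : String) :
    PySem.Str.slice (pfx ++ t) (some (PySem.Str.len pfx)) none = t := by
  apply String.toList_inj.mp
  rw [PySem.Str.toList_slice, PySem.Chars.slice_eq_listSlice, PySem.Str.len_eq,
      PySem.List.slice_from_natCast, String.toList_append]
  simp [List.drop_left]

lemma pvStartswith_append (pfx t : String) :
    PySem.Str.startswith (pfx ++ t) pfx = true := by
  rw [PySem.Str.startswith_eq, PySem.Chars.startswith_iff, String.toList_append]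
  exact List.prefix_append _ _

-- character facts for the digit test of B's parser
lemma pvLt0 (c : Char) : c < '0' ↔ c.toNat < 48 := by
  rw [Char.lt_def, UInt32.lt_iff_toNat_lt]; rfl

lemma pvGt9 (c : Char) : '9' < c ↔ 57 < c.toNat := by
  rw [Char.lt_def, UInt32.lt_iff_toNat_lt]; rfl

lemma pvDigitChar_eq (c : Char) (h : 48 ≤ c.toNat) (h2 : c.toNat ≤ 57) :
    Nat.digitChar (c.toNat - 48) = c := by
  have hc := Char.ofNat_toNat c
  interval_cases h3 : c.toNat <;> rw [← hc] <;> decide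

-- B's inner loop succeeds on all-digit input and computes the decimal fold
lemma pvCanonLoop_digits : ∀ (cs : List Char) (v : Nat),
    (∀ c ∈ cs, 48 ≤ c.toNat ∧ c.toNat ≤ 57) →
    pvCanonLoop cs v = some (cs.foldl (fun a c => a * 10 + (c.toNat - 48)) v) := by
  intro cs
  induction cs with
  | nil => intro v _; rfl
  | cons c rest ih =>
    intro v h
    obtain ⟨h1, h2⟩ := h c (List.mem_cons_self)
    rw [pvCanonLoop, if_neg (by rw [pvLt0, pvGt9]; omega)]
    rw [ih _ (fun d hd => h d (List.mem_cons_of_mem _ hd))]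
    rfl

lemma pvRep_digits : ∀ (n : Nat), ∀ c ∈ pvRep n, 48 ≤ c.toNat ∧ c.toNat ≤ 57 := by
  intro n
  induction n using Nat.strong_induction_on with
  | _ n ih =>
    intro c hc
    by_cases h : n < 10
    · rw [pvRep, dif_pos h] at hc
      simp only [List.mem_singleton] at hc
      subst hc
      exact pvDigitChar_range n h
    · rw [pvRep, dif_neg h] at hc
      rcases List.mem_append.mp hc with h1 | h1
      · exact ih (n / 10) (Nat.div_lt_self (by omega) (by omega)) c h1
      · simp only [List.mem_singleton] at h1
        subst h1
        exact pvDigitChar_range _ (Nat.mod_lt _ (by omega))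

lemma pvRep_ne_nil (n : Nat) : pvRep n ≠ [] := by
  rw [pvRep]; split <;> simp

lemma pvRep_head (n : Nat) (h : 1 ≤ n) : (pvRep n).head? ≠ some '0' := by
  induction n using Nat.strong_induction_on with
  | _ n ih =>
    by_cases h10 : n < 10
    · rw [pvRep, dif_pos h10]
      intro hc
      simp only [List.head?_cons, Option.some_inj] at hc
      have := pvDigitChar_val n h10
      rw [hc] at this
      simp at this
      omega
    · rw [pvRep, dif_neg h10]
      cases ha : pvRep (n / 10) with
      | nil => exact absurd ha (pvRep_ne_nil _)
      | cons x xs =>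
        have := ih (n / 10) (Nat.div_lt_self (by omega) (by omega)) (by omega)
        rw [ha] at this
        simpa using this

-- roundtrip: B's parser accepts the canonical decimal of n and returns n
lemma pvCanonLoop_roundtrip (n : Nat) : pvCanonLoop (pvRep n) 0 = some n := by
  rw [pvCanonLoop_digits _ _ (pvRep_digits n), pvRep_val n 0]
  simp

lemma pvCanonNum_toStr (n : Nat) : pvCanonNum (pvRep n) = some (n : Int) := by
  cases hr : pvRep n with
  | nil => exact absurd hr (pvRep_ne_nil n)
  | cons c rest =>
    rw [pvCanonNum]
    have hguard : (decide (rest ≠ []) && (c == '0')) = false := by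
      by_cases hrest : rest = []
      · simp [hrest]
      · have hn1 : 1 ≤ n := by
          by_contra hn
          have : n = 0 := by omega
          subst this
          rw [pvRep, dif_pos (by omega)] at hr
          simp only [List.cons.injEq] at hr
          exact hrest hr.2.symm
        have := pvRep_head n hn1
        rw [hr] at this
        simp only [List.head?_cons] at this
        have hc0 : c ≠ '0' := fun hc => this (by rw [hc])
        simp [hc0]
    rw [hguard]
    have := pvCanonLoop_roundtrip n
    rw [hr] at this
    rw [if_neg (by simp), this]
    rfl

-- decomposition of the loop over an append
lemma pvCanonLoop_append : ∀ (a b : List Char) (v : Nat),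
    pvCanonLoop (a ++ b) v = (pvCanonLoop a v).bind (fun w => pvCanonLoop b w) := by
  intro a
  induction a with
  | nil => intro b v; rfl
  | cons c rest ih =>
    intro b v
    rw [List.cons_append, pvCanonLoop, pvCanonLoop]
    by_cases h : c < '0' ∨ '9' < c
    · rw [if_pos h, if_pos h]; rfl
    · rw [if_neg h, if_neg h, ih]

lemma pvCanonLoop_pos : ∀ (cs : List Char) (v m : Nat), 1 ≤ v →
    pvCanonLoop cs v = some m → 1 ≤ m := by
  intro cs
  induction cs with
  | nil => intro v m hv h; simp [pvCanonLoop] at h; omega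
  | cons c rest ih =>
    intro v m hv h
    rw [pvCanonLoop] at h
    by_cases hd : c < '0' ∨ '9' < c
    · rw [if_pos hd] at h; cases h
    · rw [if_neg hd] at h
      exact ih _ m (by omega) h

-- inverse: whatever B's parser accepts IS the canonical decimal of its value
lemma pvCanon_inverse (n : Nat) : ∀ cs : List Char, cs ≠ [] →
    (1 < cs.length → cs.head? ≠ some '0') → pvCanonLoop cs 0 = some n → cs = pvRep n := by
  induction n using Nat.strong_induction_on with
  | _ n ih =>
    intro cs hne hhead hloop
    obtain ⟨ds, c, rfl⟩ : ∃ ds c, cs = ds ++ [c] := by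
      rcases List.eq_nil_or_concat cs with h | ⟨ds, c, h⟩
      · exact absurd h hne
      · exact ⟨ds, c, by simpa using h⟩
    rw [pvCanonLoop_append] at hloop
    cases hds : pvCanonLoop ds 0 with
    | none => rw [hds] at hloop; simp at hloop
    | some m =>
      rw [hds] at hloop
      simp only [Option.bind_some] at hloop
      rw [pvCanonLoop] at hloop
      by_cases hdig : c < '0' ∨ '9' < c
      · rw [if_pos hdig] at hloop; cases hloop
      · rw [if_neg hdig] at hloop
        have h48 : 48 ≤ c.toNat := by
          by_contra h
          exact hdig (Or.inl ((pvLt0 c).mpr (by omega)))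
        have h57 : c.toNat ≤ 57 := by
          by_contra h
          exact hdig (Or.inr ((pvGt9 c).mpr (by omega)))
        have hn : n = m * 10 + (c.toNat - 48) := by
          simpa [pvCanonLoop] using hloop.symm
        have hd9 : c.toNat - 48 ≤ 9 := by omega
        by_cases hds0 : ds = []
        · subst hds0
          have hm0 : m = 0 := by simpa [pvCanonLoop] using hds.symm
          subst hm0
          have hn10 : n < 10 := by omega
          rw [pvRep, dif_pos hn10]
          simp only [List.nil_append, List.cons.injEq, and_true]
          rw [hn]
          simpa using (pvDigitChar_eq c h48 h57).symm
        · have hhead' : ds.head? ≠ some '0' := by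
            have hlen : 1 < (ds ++ [c]).length := by
              cases ds with
              | nil => exact absurd rfl hds0
              | cons a b => simp
            have := hhead hlen
            cases ds with
            | nil => exact absurd rfl hds0
            | cons a b => simpa using this
          have hm1 : 1 ≤ m := by
            obtain ⟨d0, dt, rfl⟩ := List.exists_cons_of_ne_nil hds0
            rw [pvCanonLoop] at hds
            by_cases hd : d0 < '0' ∨ '9' < d0
            · rw [if_pos hd] at hds; cases hds
            · rw [if_neg hd] at hds
              have h48' : 48 ≤ d0.toNat := by
                by_contra h
                exact hd (Or.inl ((pvLt0 d0).mpr (by omega)))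
              have h57' : d0.toNat ≤ 57 := by
                by_contra h
                exact hd (Or.inr ((pvGt9 d0).mpr (by omega)))
              have hne0 : d0 ≠ '0' := by
                intro h
                exact hhead' (by rw [h]; rfl)
              have htn : d0.toNat ≠ 48 := by
                intro h
                apply hne0
                have := pvDigitChar_eq d0 h48' h57'
                rw [h] at this
                exact this.symm
              exact pvCanonLoop_pos dt _ m (by omega) hds
          have hn10 : 10 ≤ n := by omega
          have hdiv : n / 10 = m := by omega
          have hmod : n % 10 = c.toNat - 48 := by omega
          have hds_eq : ds = pvRep m :=
            ih m (by omega) ds hds0 (fun _ => hhead') hds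
          rw [pvRep, dif_neg (by omega), hdiv, hmod, hds_eq]
          congr 1
          rw [pvDigitChar_eq c h48 h57]

lemma pvCanonNum_some (cs : List Char) (y : Int) (h : pvCanonNum cs = some y) :
    ∃ m : Nat, y = (m : Int) ∧ cs = pvRep m := by
  cases cs with
  | nil => cases h
  | cons c rest =>
    rw [pvCanonNum] at h
    by_cases hg : (decide (rest ≠ []) && (c == '0')) = true
    · rw [if_pos hg] at h; cases h
    · rw [if_neg hg] at h
      cases hl : pvCanonLoop (c :: rest) 0 with
      | none => rw [hl] at h; cases h
      | some m =>
        rw [hl] at h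
        simp only [Option.map_some, Option.some_inj] at h
        refine ⟨m, h.symm, ?_⟩
        apply pvCanon_inverse m (c :: rest) (by simp) ?_ hl
        intro hlen hc
        simp only [List.head?_cons, Option.some_inj] at hc
        subst hc
        simp only [List.length_cons] at hlen
        have : rest ≠ [] := by
          intro hr; rw [hr] at hlen; simp at hlen
        simp [this] at hg

-- membership bridge: y is a collected suffix number iff pfx+str(y) is a key
lemma pvMem_nums (keys : List String) (pfx : String) (y : Int) (hy : 0 ≤ y) :
    y ∈ pvNums keys pfx ↔ (pfx ++ PySem.Int.toStr y) ∈ keys := by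
  rw [pvNums, PySem.List.mem_sorted, PySem.Set.mem_ofList, List.mem_filterMap]
  constructor
  · rintro ⟨k, hk, hf⟩
    by_cases hsw : PySem.Str.startswith k pfx = true
    · rw [if_pos hsw] at hf
      rw [PySem.Str.startswith_eq, PySem.Chars.startswith_iff] at hsw
      obtain ⟨r, hr⟩ := hsw
      have hkeq : k = pfx ++ String.ofList r := by
        apply String.toList_inj.mp
        rw [String.toList_append, String.toList_ofList]
        exact hr.symm
      rw [hkeq, pvSlice_append, String.toList_ofList] at hf
      obtain ⟨m, rfl, hrep⟩ := pvCanonNum_some r y hf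
      have hstr : PySem.Int.toStr (m : Int) = String.ofList r := by
        apply String.toList_inj.mp
        rw [pvToStr_nonneg _ (by omega), String.toList_ofList, hrep]
        simp
      rw [hstr, ← hkeq]
      exact hk
    · rw [if_neg hsw] at hf; cases hf
  · intro hk
    refine ⟨pfx ++ PySem.Int.toStr y, hk, ?_⟩
    rw [if_pos (pvStartswith_append _ _), pvSlice_append, pvToStr_nonneg y hy,
        pvCanonNum_toStr y.toNat, Int.toNat_of_nonneg hy]

-- the gap scan over a strictly increasing list returns the least free number ≥ x
lemma pvScan_spec : ∀ (l : List Int), l.Pairwise (· < ·) → ∀ (x : Int),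
    x ≤ pvScan l x ∧ pvScan l x ∉ l ∧ ∀ y, x ≤ y → y < pvScan l x → y ∈ l := by
  intro l
  induction l with
  | nil =>
    intro _ x
    refine ⟨le_refl x, by simp [pvScan], ?_⟩
    intro y h1 h2
    simp only [pvScan] at h2
    omega
  | cons n rest ih =>
    intro hp x
    obtain ⟨hlt, hrest⟩ := List.pairwise_cons.mp hp
    rw [pvScan]
    by_cases h1 : n < x
    · rw [if_pos h1]
      obtain ⟨ha, hb, hc⟩ := ih hrest x
      refine ⟨ha, ?_, fun y hy1 hy2 => List.mem_cons_of_mem _ (hc y hy1 hy2)⟩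
      intro hmem
      rcases List.mem_cons.mp hmem with heq | hm
      · omega
      · exact hb hm
    · rw [if_neg h1]
      by_cases h2 : n = x
      · rw [if_pos h2]
        obtain ⟨ha, hb, hc⟩ := ih hrest (x + 1)
        refine ⟨by omega, ?_, ?_⟩
        · intro hmem
          rcases List.mem_cons.mp hmem with heq | hm
          · omega
          · exact hb hm
        · intro y hy1 hy2
          by_cases hyx : y = x
          · subst hyx; rw [← h2]; exact List.mem_cons_self
          · exact List.mem_cons_of_mem _ (hc y (by omega) hy2)
      · rw [if_neg h2]
        refine ⟨le_refl x, ?_, fun y hy1 hy2 => absurd hy2 (by omega)⟩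
        intro hmem
        rcases List.mem_cons.mp hmem with heq | hm
        · omega
        · have := hlt x hm
          omega

-- A's probe loop returns the least free label ≥ x (given a free candidate within fuel)
lemma pvLoopA_spec (keys : List String) (pfx : String) : ∀ (fuel : Nat) (x : Int),
    (∃ k : Nat, k < fuel ∧ keys.contains (pfx ++ PySem.Int.toStr (x + (k : Int))) = false) →
    ∃ r : Int, terLoopA keys pfx x fuel = pfx ++ PySem.Int.toStr r ∧ x ≤ r ∧
      keys.contains (pfx ++ PySem.Int.toStr r) = false ∧
      ∀ y, x ≤ y → y < r → keys.contains (pfx ++ PySem.Int.toStr y) = true := by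
  intro fuel
  induction fuel with
  | zero => rintro x ⟨k, hk, -⟩; omega
  | succ f ih =>
    rintro x ⟨k, hk, hfree⟩
    rw [terLoopA]
    by_cases hx : keys.contains (pfx ++ PySem.Int.toStr x) = true
    · rw [if_pos hx]
      have hk0 : k ≠ 0 := by
        rintro rfl
        simp only [Nat.cast_zero, add_zero] at hfree
        rw [hfree] at hx
        exact Bool.false_ne_true hx
      obtain ⟨r, h1, h2, h3, h4⟩ := ih (x + 1)
        ⟨k - 1, by omega, by
          have : x + 1 + ((k - 1 : Nat) : Int) = x + (k : Int) := by omega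
          rw [this]; exact hfree⟩
      refine ⟨r, h1, by omega, h3, ?_⟩
      intro y hy1 hy2
      by_cases hyx : y = x
      · subst hyx; exact hx
      · exact h4 y (by omega) hy2
    · rw [if_neg hx]
      refine ⟨x, rfl, le_refl x, ?_, fun y h1 h2 => absurd h2 (by omega)⟩
      revert hx
      cases keys.contains (pfx ++ PySem.Int.toStr x) <;> simp

-- pigeonhole: among l.length+1 candidates with pairwise different labels one is free
lemma pvExists_free (l : List String) (g : Nat → String)
    (hg : ∀ i j, i ≤ l.length → j ≤ l.length → g i = g j → i = j) :
    ∃ k : Nat, k < l.length + 1 ∧ l.contains (g k) = false := by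
  by_contra hcon
  push_neg at hcon
  have hmem : ∀ k, k < l.length + 1 → g k ∈ l := by
    intro k hk
    rcases Bool.eq_false_or_eq_true (l.contains (g k)) with h | h
    · exact List.contains_iff_mem.mp h
    · exact ((hcon k hk) h).elim
  have hnd : ((List.range (l.length + 1)).map g).Nodup := by
    apply List.Nodup.map_on _ (List.nodup_range)
    intro i hi j hj hij
    exact hg i j (by simpa using Nat.lt_succ_iff.mp (List.mem_range.mp hi))
      (by simpa using Nat.lt_succ_iff.mp (List.mem_range.mp hj)) hij
  have hsub : ((List.range (l.length + 1)).map g) ⊆ l := by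
    intro y hy
    obtain ⟨k, hk, rfl⟩ := List.mem_map.mp hy
    exact hmem k (List.mem_range.mp hk)
  have := (hnd.subperm hsub).length_le
  simp at this

-- A's probe loop computes exactly B's sorted-gap-scan label
lemma pvNextFree_eq (keys : List String) (pfx : String) (start : Int) (hs : 1 ≤ start) :
    terLoopA keys pfx start (keys.length + 1) = nextFree keys pfx start := by
  obtain ⟨k, hk, hfree⟩ := pvExists_free keys (fun k => pfx ++ PySem.Int.toStr (start + (k : Int)))
    (by
      intro i j hi hj hij
      have := pvToStr_inj (a := start + (i : Int)) (b := start + (j : Int))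
        (by omega) (by omega) (pvAppend_cancel hij)
      omega)
  obtain ⟨rA, hA1, hA2, hA3, hA4⟩ := pvLoopA_spec keys pfx (keys.length + 1) start ⟨k, hk, hfree⟩
  have hpw : (pvNums keys pfx).Pairwise (· < ·) := PySem.List.sorted_ofList_pairwise_lt _
  obtain ⟨hB1, hB2, hB3⟩ := pvScan_spec (pvNums keys pfx) hpw start
  set rB := pvScan (pvNums keys pfx) start with hrB
  have hbridge : ∀ y : Int, start ≤ y →
      (y ∈ pvNums keys pfx ↔ keys.contains (pfx ++ PySem.Int.toStr y) = true) := by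
    intro y hy
    rw [pvMem_nums keys pfx y (by omega)]
    exact Iff.symm List.contains_iff_mem
  have hreq : rA = rB := by
    rcases lt_trichotomy rA rB with h | h | h
    · have hmem := hB3 rA hA2 h
      rw [hbridge rA hA2] at hmem
      rw [hmem] at hA3
      cases hA3
    · exact h
    · have hcont := hA4 rB hB1 h
      rw [← hbridge rB hB1] at hcont
      exact absurd hcont hB2
  rw [nextFree, hA1, hreq]

-- ===== VERDICT (by name: the statement is the Claim_ definition above) =====
theorem ter_block_label_spec : Claim_equal_ter_block_label := by
  intro molecule_keys molecule_name combine_aa_to_protein peptide_atom_number atom_number _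
  unfold Spec_ter_block_label
  simp only [ter_block_label, ter_block_label_alt]
  by_cases hAA : (pvAA_LIST.contains (PySem.Str.upper molecule_name)
      || pvAA_UNNAT_LIST.contains (PySem.Str.upper molecule_name)) = true
  · rw [if_pos hAA, if_pos hAA]
    by_cases hPep : (decide (0 < peptide_atom_number.length)
        && peptide_atom_number.contains atom_number) = true
    · rw [if_pos hPep, if_pos hPep]
      rw [show (("peptide_" : String) != "") = true from rfl, if_pos rfl]
      exact pvNextFree_eq _ _ _ (by omega)
    · rw [if_neg hPep, if_neg hPep]
      by_cases hC : combine_aa_to_protein = true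
      · rw [if_pos hC, if_pos hC]
        rw [show (("protein_" : String) != "") = true from rfl, if_pos rfl]
        exact pvNextFree_eq _ _ _ (by omega)
      · rw [if_neg hC, if_neg hC]
        rw [show (("" : String) != "") = false from rfl]
        rw [if_neg (by simp)]
        by_cases hIn : molecule_keys.contains molecule_name = true
        · rw [if_pos hIn, if_pos hIn]
          exact pvNextFree_eq _ _ _ (by omega)
        · rw [if_neg hIn, if_neg hIn]
  · rw [if_neg hAA, if_neg hAA]
    by_cases hSolv : (molecule_name == "solv") = true
    · rw [if_pos hSolv, if_pos hSolv]
      rw [show (("solv_" : String) != "") = true from rfl, if_pos rfl]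
      exact pvNextFree_eq _ _ _ (by omega)
    · rw [if_neg hSolv, if_neg hSolv]
      rw [show (("" : String) != "") = false from rfl]
      rw [if_neg (by simp)]
      by_cases hIn : molecule_keys.contains molecule_name = true
      · rw [if_pos hIn, if_pos hIn]
        exact pvNextFree_eq _ _ _ (by omega)
      · rw [if_neg hIn, if_neg hIn]
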